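-- pv_equiv track=rewrite | github.com/wangjingshen/bioinfo_tools | 2024/pathseq/script/barcode.py | findall_mismatch
-- ===== SOURCE A (Python) =====
-- import itertools
--
-- def findall_mismatch(seq, n_mismatch=1, bases='ACGTN'):
--     """
--     choose locations where there's going to be a mismatch using combinations
--     and then construct all satisfying lists using product
--
--     Return:
--     all mismatch <= n_mismatch set.
--
--     >>> answer = set(["TCG", "AAG", "ACC", "ATG", "ACT", "ACN", "GCG", "ANG", "ACA", "ACG", "CCG", "AGG", "NCG"])
--     >>> seq_set = findall_mismatch("ACG")
--     >>> seq_set == answer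
--     True
--     """
--     seq_set = set()
--     seq_len = len(seq)
--     if n_mismatch > seq_len:
--         n_mismatch = seq_len
--     for locs in itertools.combinations(range(seq_len), n_mismatch):
--         seq_locs = [[base] for base in seq]
--         for loc in locs:
--             seq_locs[loc] = list(bases)
--         for poss in itertools.product(*seq_locs):
--             seq_set.add(''.join(poss))
--     return seq_set
-- ===== SOURCE B (Python) =====
-- def findall_mismatch(seq, n_mismatch=1, bases='ACGTN'):
--     """Recursive generators instead of itertools + mutation: a position-indexed
--     combination recursion and a fused string builder; one dedup at the end."""
--     L = len(seq)
--     n = n_mismatch if n_mismatch < L else L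
--     def combos(start, k):
--         if k == 0:
--             return [[]]
--         return [[i] + rest for i in range(start, L - k + 1) for rest in combos(i + 1, k - 1)]
--     def build(i, locs):
--         if i == L:
--             return ['']
--         choices = bases if i in locs else seq[i]
--         return [c + tail for c in choices for tail in build(i + 1, locs)]
--     return set(s for locs in combos(0, n) for s in build(0, locs))
-- ===== Notes on version B (the rewrite author's own statement) =====
-- stated objective: alternative
-- what changed: replaces itertools.combinations/itertools.product plus per-combination list-of-lists mutation and incremental set insertion by two direct recursive generators (a position-indexed combination recursion and a fused string builder that never materialises the choice table) with a single dedup at the end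
import Mathlib
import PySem

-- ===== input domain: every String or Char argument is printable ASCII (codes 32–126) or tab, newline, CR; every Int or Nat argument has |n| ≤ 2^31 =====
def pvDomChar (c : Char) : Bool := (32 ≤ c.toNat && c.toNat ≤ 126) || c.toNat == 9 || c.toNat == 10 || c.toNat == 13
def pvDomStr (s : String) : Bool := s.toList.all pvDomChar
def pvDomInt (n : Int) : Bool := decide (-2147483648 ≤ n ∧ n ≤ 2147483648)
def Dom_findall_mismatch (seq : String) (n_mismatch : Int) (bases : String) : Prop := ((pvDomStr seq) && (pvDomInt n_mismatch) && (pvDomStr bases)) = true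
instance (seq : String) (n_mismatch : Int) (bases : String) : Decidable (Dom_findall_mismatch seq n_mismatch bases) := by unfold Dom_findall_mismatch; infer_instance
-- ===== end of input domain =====

-- B replaces itertools.combinations/product + in-place list mutation + incremental set insertion
-- by two direct recursive generators with one dedup at the end (objective: alternative; same cost).


-- ===== PORT A =====
-- hand port of itertools.product over a list of char-lists (leftmost factor varies slowest,
-- exactly CPython's order); the 1-character strings of the Python tuples are modelled as Char,
-- ''.join(poss) below is then String.ofList
def pvProdA : List (List Char) → List (List Char)
  | [] => [[]]
  | l :: ls => l.flatMap (fun x => (pvProdA ls).map (fun rest => x :: rest))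

def findall_mismatch (seq : String) (n_mismatch : Int) (bases : String) : List String :=
  let seq_len : Int := PySem.Str.len seq
  let n : Int := if n_mismatch > seq_len then seq_len else n_mismatch
  -- n.toNat: itertools.combinations raises ValueError for negative r — excluded by Pre_
  (PySem.List.combinations (PySem.List.pyRange 0 seq_len 1) n.toNat).foldl
    (fun seq_set locs =>
      let seq_locs0 : List (List Char) := seq.toList.map (fun base => [base])
      let seq_locs := locs.foldl (fun sl loc => PySem.List.pySetD sl loc bases.toList) seq_locs0
      (pvProdA seq_locs).foldl (fun st poss => PySem.Set.add st (String.ofList poss)) seq_set)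
    PySem.Set.empty

-- ===== PORT B =====
-- combos(start, k) of Source B; recursion is on k (Python's k int: negative k diverges, outside Pre_)
def pvCombosB (L : Int) : Int → Nat → List (List Int)
  | _, 0 => [[]]
  | start, k + 1 =>
      (PySem.List.pyRange start (L - ((k : Int) + 1) + 1) 1).flatMap
        (fun i => (pvCombosB L (i + 1) k).map (fun rest => i :: rest))

-- build(i, locs) of Source B; Python tests i == L and only ever calls i ≤ L, the guard L ≤ i is the
-- same test made total; 'c + tail' is String.ofList (c :: tail.toList)
def pvBuildB (seq bases : List Char) (L : Nat) (locs : List Int) (i : Nat) : List String :=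
  if L ≤ i then [""]
  else
    let choices : List Char :=
      if (i : Int) ∈ locs then bases else [PySem.List.pyGetD seq (i : Int) ' ']
    choices.flatMap
      (fun c => (pvBuildB seq bases L locs (i + 1)).map (fun tail => String.ofList (c :: tail.toList)))
  termination_by L - i
  decreasing_by omega

def findall_mismatch_alt (seq : String) (n_mismatch : Int) (bases : String) : List String :=
  let L : Int := PySem.Str.len seq
  let n : Int := if n_mismatch < L then n_mismatch else L
  PySem.Set.ofList
    ((pvCombosB L 0 n.toNat).flatMap
      (fun locs => pvBuildB seq.toList bases.toList seq.toList.length locs 0))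

-- ===== PRECONDITION & SPEC =====
-- A raises ValueError (itertools.combinations with negative r) when n_mismatch < 0
def Pre_findall_mismatch (seq : String) (n_mismatch : Int) (bases : String) : Prop :=
  0 ≤ n_mismatch
instance (seq : String) (n_mismatch : Int) (bases : String) : Decidable (Pre_findall_mismatch seq n_mismatch bases) := by unfold Pre_findall_mismatch; infer_instance
def pvWitness_findall_mismatch : String × Int × String := ("AC", 1, "ACG")

def Spec_findall_mismatch (seq : String) (n_mismatch : Int) (bases : String) (out : List String) : Prop := out = findall_mismatch_alt seq n_mismatch bases
instance (seq : String) (n_mismatch : Int) (bases : String) (out : List String) : Decidable (Spec_findall_mismatch seq n_mismatch bases out) := by unfold Spec_findall_mismatch; infer_instance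

-- ===== CLAIM (what is proved, stated in full; the proofs are below) =====
def Claim_equal_findall_mismatch : Prop := ∀ (seq : String) (n_mismatch : Int) (bases : String), Dom_findall_mismatch seq n_mismatch bases → Pre_findall_mismatch seq n_mismatch bases → Spec_findall_mismatch seq n_mismatch bases (findall_mismatch seq n_mismatch bases)

-- ===== LEMMAS AND PROOFS =====

-- combinations(range(s, L), k) enumerated by combos' start-indexed recursion
lemma pv_comb_eq_combosB_succ (L : Int) (k : Nat)
    (IH : ∀ s : Int, PySem.List.combinations (PySem.List.pyRange s L 1) k = pvCombosB L s k) :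
    ∀ (n : Nat) (s : Int), (L - s).toNat ≤ n →
      PySem.List.combinations (PySem.List.pyRange s L 1) (k + 1) = pvCombosB L s (k + 1) := by
  intro n
  induction n with
  | zero =>
      intro s hs
      have hLs : L ≤ s := by omega
      have hb : L - ((k : Int) + 1) + 1 ≤ s := by omega
      rw [PySem.List.pyRange_one_eq_nil hLs, PySem.List.combinations_nil_succ, pvCombosB,
        PySem.List.pyRange_one_eq_nil hb]
      rfl
  | succ n ih =>
      intro s hs
      by_cases hcase : s < L - (k : Int)
      · have hsL : s < L := by omega
        have hb : s < L - ((k : Int) + 1) + 1 := by omega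
        rw [PySem.List.pyRange_one_cons hsL, PySem.List.combinations_cons_succ, IH,
          ih (s + 1) (by omega)]
        conv_rhs => rw [pvCombosB, PySem.List.pyRange_one_cons hb, List.flatMap_cons]
        rw [pvCombosB]
      · have hlen : (PySem.List.pyRange s L 1).length < k + 1 := by
          rw [PySem.List.length_pyRange_one]; omega
        have hb : L - ((k : Int) + 1) + 1 ≤ s := by omega
        rw [PySem.List.combinations_eq_nil_of_length_lt _ hlen, pvCombosB,
          PySem.List.pyRange_one_eq_nil hb]
        rfl

lemma pv_comb_eq_combosB (L : Int) : ∀ (k : Nat) (s : Int),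
    PySem.List.combinations (PySem.List.pyRange s L 1) k = pvCombosB L s k := by
  intro k
  induction k with
  | zero => intro s; simp [pvCombosB, PySem.List.combinations_zero]
  | succ k ih => intro s; exact pv_comb_eq_combosB_succ L k ih (L - s).toNat s le_rfl

lemma pv_foldl_setD_length (bases : List Char) :
    ∀ (locs : List Int) (sl : List (List Char)),
      (locs.foldl (fun sl loc => PySem.List.pySetD sl loc bases) sl).length = sl.length := by
  intro locs
  induction locs with
  | nil => intro sl; rfl
  | cons a locs ih =>
      intro sl
      rw [List.foldl_cons, ih, PySem.List.length_pySetD]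

lemma pv_foldl_setD_getD (bases : List Char) :
    ∀ (locs : List Int) (sl : List (List Char)),
      (∀ x ∈ locs, 0 ≤ x) →
      ∀ i : Nat, i < sl.length →
        (locs.foldl (fun sl loc => PySem.List.pySetD sl loc bases) sl).getD i []
          = if (i : Int) ∈ locs then bases else sl.getD i [] := by
  intro locs
  induction locs with
  | nil => intro sl _ i _; simp
  | cons a locs ih =>
      intro sl hnn i hi
      have ha : 0 ≤ a := hnn a (by simp)
      rw [List.foldl_cons, PySem.List.pySetD_of_nonneg sl _ ha,
        ih (sl.set a.toNat bases) (fun x hx => hnn x (by simp [hx])) i (by simpa using hi)]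
      by_cases hmem : (i : Int) ∈ locs
      · simp [hmem]
      · have hset : (sl.set a.toNat bases).getD i [] = if i = a.toNat then bases else sl.getD i [] := by
          by_cases hia : i = a.toNat
          · subst hia
            simp [List.getD, hi]
          · simp [List.getD, hia, Ne.symm hia]
        rw [hset]
        have hiff : ((i : Int) ∈ a :: locs) ↔ i = a.toNat := by
          simp only [List.mem_cons, hmem, or_false]
          omega
        by_cases hia : i = a.toNat
        · rw [if_neg hmem, if_pos hia, if_pos (hiff.mpr hia)]
        · rw [if_neg hmem, if_neg hia, if_neg (fun h => hia (hiff.mp h))]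

-- build i = the tail product of the (characterised) choice table, joined
lemma pv_build_eq_prod (seq bases : List Char) (locs : List Int) (sl : List (List Char))
    (hlen : sl.length = seq.length)
    (hget : ∀ i : Nat, i < seq.length →
      sl.getD i [] = if (i : Int) ∈ locs then bases else [PySem.List.pyGetD seq (i : Int) ' ']) :
    ∀ (n i : Nat), seq.length - i ≤ n →
      pvBuildB seq bases seq.length locs i = (pvProdA (sl.drop i)).map String.ofList := by
  intro n
  induction n with
  | zero =>
      intro i hle
      have hLi : seq.length ≤ i := by omega
      rw [pvBuildB, if_pos hLi, List.drop_eq_nil_of_le (by omega : sl.length ≤ i)]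
      simp [pvProdA]
  | succ n ihn =>
      intro i hle
      by_cases hLi : seq.length ≤ i
      · rw [pvBuildB, if_pos hLi, List.drop_eq_nil_of_le (by omega : sl.length ≤ i)]
        simp [pvProdA]
      · have hi : i < seq.length := by omega
        have hi' : i < sl.length := by omega
        rw [pvBuildB, if_neg hLi]
        have hdrop : sl.drop i = sl.getD i [] :: sl.drop (i + 1) := by
          rw [List.drop_eq_getElem_cons hi']
          congr 1
          simp [List.getD, List.getElem?_eq_getElem hi']
        rw [hdrop]
        simp only [pvProdA, List.map_flatMap, List.map_map, hget i hi,
          ihn (i + 1) (by omega)]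
        simp [Function.comp_def, String.toList_ofList]

-- the doubly nested add-loop of A is one fold of Set.add over the flattened joined stream
lemma pv_foldl_set_add (ls : List (List Int)) (f : List Int → List (List Char)) :
    ∀ s0 : PySem.Set String,
      ls.foldl (fun s a => (f a).foldl (fun st poss => PySem.Set.add st (String.ofList poss)) s) s0
        = (ls.flatMap (fun a => (f a).map String.ofList)).foldl PySem.Set.add s0 := by
  induction ls with
  | nil => intro s0; rfl
  | cons a ls ih =>
      intro s0
      rw [List.foldl_cons, List.flatMap_cons, List.foldl_append, ih, List.foldl_map]

lemma pv_flatMap_congr_mem {α β : Type} (l : List α) (f g : α → List β)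
    (h : ∀ a ∈ l, f a = g a) : l.flatMap f = l.flatMap g := by
  induction l with
  | nil => rfl
  | cons a l ih =>
      simp only [List.flatMap_cons, h a (by simp), ih (fun x hx => h x (by simp [hx]))]

-- ===== VERDICT (by name: the statement is the Claim_ definition above) =====
theorem findall_mismatch_spec : Claim_equal_findall_mismatch := by
  intro seq n_mismatch bases _ _
  unfold Spec_findall_mismatch findall_mismatch findall_mismatch_alt
  simp only [PySem.Str.len_eq]
  have hn : (if n_mismatch > (seq.toList.length : Int) then (seq.toList.length : Int) else n_mismatch)
      = (if n_mismatch < (seq.toList.length : Int) then n_mismatch else (seq.toList.length : Int)) := by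
    split_ifs <;> omega
  rw [hn]
  rw [pv_foldl_set_add _ (fun locs => pvProdA (locs.foldl
        (fun sl loc => PySem.List.pySetD sl loc bases.toList)
        (seq.toList.map (fun base => [base]))))]
  rw [show (PySem.Set.empty : PySem.Set String) = [] from rfl, ← PySem.Set.ofList_eq_foldl]
  congr 1
  rw [← pv_comb_eq_combosB (seq.toList.length : Int)
        (if n_mismatch < (seq.toList.length : Int) then n_mismatch else (seq.toList.length : Int)).toNat 0]
  apply pv_flatMap_congr_mem
  intro locs hmem
  have hbnd : ∀ x ∈ locs, 0 ≤ x ∧ x < (seq.toList.length : Int) := by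
    intro x hx
    have hx' := (PySem.List.sublist_of_mem_combinations hmem).subset hx
    have h2 := PySem.List.mem_pyRange_one.mp hx'
    exact ⟨h2.1, h2.2⟩
  have hlen : (locs.foldl (fun sl loc => PySem.List.pySetD sl loc bases.toList)
      (seq.toList.map (fun base => [base]))).length = seq.toList.length := by
    rw [pv_foldl_setD_length]
    simp
  have hget : ∀ i : Nat, i < seq.toList.length →
      (locs.foldl (fun sl loc => PySem.List.pySetD sl loc bases.toList)
        (seq.toList.map (fun base => [base]))).getD i []
        = if (i : Int) ∈ locs then bases.toList else [PySem.List.pyGetD seq.toList (i : Int) ' '] := by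
    intro i hi
    rw [pv_foldl_setD_getD bases.toList locs _ (fun x hx => (hbnd x hx).1) i (by simpa using hi)]
    by_cases hm : (i : Int) ∈ locs
    · rw [if_pos hm, if_pos hm]
    · rw [if_neg hm, if_neg hm, PySem.List.pyGetD_natCast]
      simp [List.getD, List.getElem?_eq_getElem hi]
  rw [← List.drop_zero (l := (locs.foldl (fun sl loc => PySem.List.pySetD sl loc bases.toList)
        (seq.toList.map (fun base => [base]))))]
  exact (pv_build_eq_prod seq.toList bases.toList locs _ hlen hget seq.toList.length 0 (by omega)).symm
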